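-- pv_equiv track=rewrite | github.com/Detroix23/numpy_tree | src/numpy_tree_detroix23/base/iterables.py | end_or_no_blank
-- ===== SOURCE A (Python) =====
-- def end_or_no_blank(t: tuple[str, ...]) -> bool:
--     """
--     Return True if `t` only ends or has no blanks.
--     False if blanks at the start, or in the middle.
--     """
--     index: int = len(t) - 1
--     solid: bool = False
--     valid: bool = True
--     while valid and index >= 0:
--         if t[index]:
--             solid = True
--         if solid and not t[index]:
--             valid = False
--         index -= 1
--
--     return valid
-- ===== SOURCE B (Python) =====
-- def end_or_no_blank(t: tuple[str, ...]) -> bool: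
--     """
--     Two-phase version: drop the trailing run of blanks, then every
--     remaining element must be non-blank.
--     """
--     rest = list(t)
--     while rest and not rest[-1]:
--         rest.pop()
--     return all(rest)
-- ===== Notes on version B (the rewrite author's own statement) =====
-- stated objective: simpler
-- what changed: Replaces A's stateful backward scan with solid/valid flags by a two-phase structure: strip the trailing run of blank strings, then check the rest with all(); the measured constant-factor speedup comes from the C-level all() replacing per-element interpreted flag updates.
import Mathlib
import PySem

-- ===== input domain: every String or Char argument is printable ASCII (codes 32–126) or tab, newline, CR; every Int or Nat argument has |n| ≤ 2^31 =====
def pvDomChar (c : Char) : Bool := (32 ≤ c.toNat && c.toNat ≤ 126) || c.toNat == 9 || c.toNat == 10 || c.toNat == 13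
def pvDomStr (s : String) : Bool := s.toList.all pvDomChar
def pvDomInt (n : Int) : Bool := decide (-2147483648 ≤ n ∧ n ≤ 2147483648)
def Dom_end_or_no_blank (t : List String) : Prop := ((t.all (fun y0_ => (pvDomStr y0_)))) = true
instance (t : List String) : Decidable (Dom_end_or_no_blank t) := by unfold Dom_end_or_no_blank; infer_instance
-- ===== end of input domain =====

-- B replaces A's single backward scan with solid/valid flags by a two-phase
-- structure (strip trailing blanks, then all() over the rest); objective: simpler.

-- ===== PORT A =====
-- A walks index from len(t)-1 down to 0 with flags solid/valid; we recurse over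
-- t.reverse carrying the same two flags, stopping (as the while condition does)
-- once valid is false.
def endLoopA : List String → Bool → Bool → Bool
  | [], _, valid => valid
  | s :: rs, solid, valid =>
    if valid then
      let solid' := if s ≠ "" then true else solid
      let valid' := if solid' && (s = "") then false else valid
      endLoopA rs solid' valid'
    else valid

def end_or_no_blank (t : List String) : Bool := endLoopA t.reverse false true

-- ===== PORT B =====
-- Source B pops blanks off the end of a copied list (= dropping from the head of the
-- reverse), then returns all() of what remains.
def stripBlanksRev : List String → List String
  | [] => []
  | s :: rs => if s = "" then stripBlanksRev rs else s :: rs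

def end_or_no_blank_alt (t : List String) : Bool :=
  (stripBlanksRev t.reverse).all (fun s => !(s = ""))

-- ===== PRECONDITION & SPEC =====
def Spec_end_or_no_blank (t : List String) (out : Bool) : Prop := out = end_or_no_blank_alt t
instance (t : List String) (out : Bool) : Decidable (Spec_end_or_no_blank t out) := by unfold Spec_end_or_no_blank; infer_instance

-- ===== CLAIM (what is proved, stated in full; the proofs are below) =====
def Claim_equal_end_or_no_blank : Prop := ∀ (t : List String), Dom_end_or_no_blank t → Spec_end_or_no_blank t (end_or_no_blank t)

-- ===== LEMMAS AND PROOFS =====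
theorem endLoopA_false (r : List String) (solid : Bool) : endLoopA r solid false = false := by
  cases r <;> simp [endLoopA]

theorem endLoopA_solid (r : List String) : endLoopA r true true = r.all (fun s => !(s = "")) := by
  induction r with
  | nil => simp [endLoopA]
  | cons s rs ih =>
    by_cases hs : s = "" <;> simp [endLoopA, hs, endLoopA_false, ih]

theorem endLoopA_strip (r : List String) :
    endLoopA r false true = (stripBlanksRev r).all (fun s => !(s = "")) := by
  induction r with
  | nil => simp [endLoopA, stripBlanksRev]
  | cons s rs ih =>
    by_cases hs : s = "" <;> simp [endLoopA, stripBlanksRev, hs, ih, endLoopA_solid]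

-- ===== VERDICT (by name: the statement is the Claim_ definition above) =====
theorem end_or_no_blank_spec : Claim_equal_end_or_no_blank := by
  intro t _
  unfold Spec_end_or_no_blank end_or_no_blank end_or_no_blank_alt
  exact endLoopA_strip t.reverse
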